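-- pv_equiv track=rewrite | github.com/chauhanswapnil/Coding-Challenges | KickStart/Coding Practice Kickstart #3/GBuses.py | solution
-- ===== SOURCE A (Python) =====
-- def solution(N, buses, P, cities):
--     count = [0] * 5002
--     for i in range(0,len(buses)):
--         if i % 2 == 0:
--             count[buses[i]] +=1
--         else:
--             count[buses[i] + 1] -= 1
--     for i in range(1, len(count)):
--         count[i] = count[i-1] + count[i]
--     ans = []
--     for city in cities:
--         ans.append(count[city])
--     return ' '.join(str(i) for i in ans)
-- ===== SOURCE B (Python) =====
-- def solution(N, buses, P, cities):
--     # Per-query summation: drop the prefix-sum pass and answer each city by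
--     # summing the start/end deltas at or before its slot.
--     diff = [0] * 5002
--     for s in buses[::2]:
--         diff[s] += 1
--     for e in buses[1::2]:
--         diff[e + 1] -= 1
--     return ' '.join(str(sum(diff[c::-1])) for c in cities)
-- ===== Notes on version B (the rewrite author's own statement) =====
-- stated objective: simpler
-- what changed: Drops A's in-place prefix-sum pass and table lookups: B fills the start/end delta table with two strided passes (buses[::2] / buses[1::2]) and answers each queried city by summing the deltas at or before its slot with sum(diff[c::-1]).
import Mathlib
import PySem

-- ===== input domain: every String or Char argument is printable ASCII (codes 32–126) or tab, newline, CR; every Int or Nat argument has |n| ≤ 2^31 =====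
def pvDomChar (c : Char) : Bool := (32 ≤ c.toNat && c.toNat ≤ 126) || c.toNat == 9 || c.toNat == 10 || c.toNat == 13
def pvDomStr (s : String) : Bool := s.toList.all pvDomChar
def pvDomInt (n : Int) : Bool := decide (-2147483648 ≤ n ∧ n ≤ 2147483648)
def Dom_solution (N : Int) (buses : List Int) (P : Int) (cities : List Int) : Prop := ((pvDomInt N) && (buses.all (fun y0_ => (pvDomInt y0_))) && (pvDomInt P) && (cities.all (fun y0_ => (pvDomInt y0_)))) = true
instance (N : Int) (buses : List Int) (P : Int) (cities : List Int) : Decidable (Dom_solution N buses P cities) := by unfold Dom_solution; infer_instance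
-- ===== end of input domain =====

-- B drops A's in-place prefix-sum pass and table lookups: it fills the delta table with two
-- strided passes and answers each city by summing the deltas at or before its slot (simpler, not faster).

-- ===== PORT A =====

-- list[i] += d with Python list indexing (a negative index counts from the end; out of
-- range = IndexError, excluded by Pre_solution); the elementary step of both ports
def pyAddAt (cnt : List Int) (i d : Int) : List Int :=
  match PySem.List.pyGet? cnt i with
  | some v => PySem.List.pySetD cnt i (v + d)
  | none => cnt   -- Python raises IndexError here; such inputs are outside Pre_solution

-- A's first loop: build the difference array
def phase1A (buses : List Int) : List Int :=
  (PySem.List.pyRange 0 (PySem.List.len buses)).foldl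
    (fun cnt i =>
      if PySem.Int.mod i 2 = 0 then
        pyAddAt cnt (PySem.List.pyGetD buses i 0) 1
      else
        pyAddAt cnt (PySem.List.pyGetD buses i 0 + 1) (-1))
    (List.replicate 5002 0)

-- A's second loop: in-place prefix sums
def phase2A (count : List Int) : List Int :=
  (PySem.List.pyRange 1 (PySem.List.len count)).foldl
    (fun cnt i =>
      PySem.List.pySetD cnt i (PySem.List.pyGetD cnt (i - 1) 0 + PySem.List.pyGetD cnt i 0))
    count

def solution (N : Int) (buses : List Int) (P : Int) (cities : List Int) : String :=
  let count := phase2A (phase1A buses)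
  let ans := cities.map (fun city => PySem.List.pyGetD count city 0)
  PySem.Str.join " " (ans.map (fun i => PySem.Int.toStr i))

-- ===== PORT B =====

-- Source B: diff = [0]*5002; for s in buses[::2]: diff[s] += 1; for e in buses[1::2]: diff[e+1] -= 1;
--       ' '.join(str(sum(diff[c::-1])) for c in cities)
def solution_alt (N : Int) (buses : List Int) (P : Int) (cities : List Int) : String :=
  let diff0 : List Int := List.replicate 5002 0
  let diff1 := ((PySem.List.slice? buses none none 2).getD []).foldl (fun d s => pyAddAt d s 1) diff0
  let diff2 := ((PySem.List.slice? buses (some 1) none 2).getD []).foldl (fun d e => pyAddAt d (e + 1) (-1)) diff1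
  PySem.Str.join " "
    (cities.map (fun c => PySem.Int.toStr ((PySem.List.slice? diff2 (some c) none (-1)).getD []).sum))

-- ===== PRECONDITION & SPEC =====

-- Pre_solution is exactly where Python A returns normally: every even-indexed bus value is a valid
-- (possibly negative) index into the 5002-slot table, every odd-indexed value +1 likewise, and every
-- queried city likewise; outside it A raises IndexError.
def Pre_solution (N : Int) (buses : List Int) (P : Int) (cities : List Int) : Prop :=
  (∀ k < buses.length,
    (k % 2 = 0 → -5002 ≤ buses.getD k 0 ∧ buses.getD k 0 ≤ 5001) ∧
    (k % 2 = 1 → -5003 ≤ buses.getD k 0 ∧ buses.getD k 0 ≤ 5000)) ∧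
  (∀ c ∈ cities, -5002 ≤ c ∧ c ≤ 5001)

instance (N : Int) (buses : List Int) (P : Int) (cities : List Int) : Decidable (Pre_solution N buses P cities) := by unfold Pre_solution; infer_instance

def pvWitness_solution : Int × List Int × Int × List Int := (2, [1, 2, 2, 3], 2, [1, 2, 3])

def Spec_solution (N : Int) (buses : List Int) (P : Int) (cities : List Int) (out : String) : Prop := out = solution_alt N buses P cities
instance (N : Int) (buses : List Int) (P : Int) (cities : List Int) (out : String) : Decidable (Spec_solution N buses P cities out) := by unfold Spec_solution; infer_instance

-- ===== CLAIM (what is proved, stated in full; the proofs are below) =====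
def Claim_equal_solution : Prop := ∀ (N : Int) (buses : List Int) (P : Int) (cities : List Int), Dom_solution N buses P cities → Pre_solution N buses P cities → Spec_solution N buses P cities (solution N buses P cities)

-- ===== LEMMAS AND PROOFS =====

-- reading the array at a Nat index
def aget (a : List Int) (j : Nat) : Int := a.getD j 0

-- A's first-loop body, seen over (index, value) pairs
def abody (cnt : List Int) (p : Int × Int) : List Int :=
  if PySem.Int.mod p.1 2 = 0 then pyAddAt cnt p.2 1 else pyAddAt cnt (p.2 + 1) (-1)

-- the (index, value) pairs A's updates stay in range for
def evOK (p : Int × Int) : Prop :=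
  (PySem.Int.mod p.1 2 = 0 → -5002 ≤ p.2 ∧ p.2 ≤ 5001) ∧
  (¬ PySem.Int.mod p.1 2 = 0 → -5002 ≤ p.2 + 1 ∧ p.2 + 1 ≤ 5001)

-- contribution of one (index, value) pair to the difference array at slot t
def evDelta (p : Int × Int) (t : Int) : Int :=
  if PySem.Int.mod p.1 2 = 0 then (if t = p.2 % 5002 then 1 else 0)
  else (if t = (p.2 + 1) % 5002 then -1 else 0)

-- prefix sums of the difference array
def pref (a : List Int) (j : Nat) : Int := ∑ t ∈ Finset.range (j + 1), aget a t

lemma modtwo (i : Int) : PySem.Int.mod i 2 = i % 2 := by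
  simp [PySem.Int.mod, Int.fmod_eq_emod]

lemma aget_set (a : List Int) (n : Nat) (v : Int) (j : Nat) :
    aget (a.set n v) j = if j = n ∧ n < a.length then v else aget a j := by
  simp only [aget, List.getD_eq_getElem?_getD, List.getElem?_set]
  split_ifs with h1 h2 h3 h4 <;> simp_all

lemma pyIdx_wrap (x : Int) (h1 : -5002 ≤ x) (h2 : x ≤ 5001) :
    PySem.List.pyIdx? 5002 x = some ((x % 5002).toNat) := by
  simp only [PySem.List.pyIdx?]
  by_cases hx : 0 ≤ x
  · rw [if_pos hx, if_pos (by push_cast; omega)]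
    congr 1
    omega
  · rw [if_neg hx, if_pos (by push_cast; omega)]
    congr 1
    omega

lemma pyGet_wrap (a : List Int) (hlen : a.length = 5002) (x : Int)
    (h1 : -5002 ≤ x) (h2 : x ≤ 5001) :
    PySem.List.pyGet? a x = some (aget a ((x % 5002).toNat)) := by
  have hk : (x % 5002).toNat < a.length := by omega
  simp only [PySem.List.pyGet?, hlen, pyIdx_wrap x h1 h2, Option.bind_some]
  rw [List.getElem?_eq_getElem hk]
  simp [aget, List.getD_eq_getElem?_getD, List.getElem?_eq_getElem hk]

lemma pyGetD_wrap (a : List Int) (hlen : a.length = 5002) (x : Int)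
    (h1 : -5002 ≤ x) (h2 : x ≤ 5001) :
    PySem.List.pyGetD a x 0 = aget a ((x % 5002).toNat) := by
  simp [PySem.List.pyGetD, pyGet_wrap a hlen x h1 h2]

lemma pyAddAt_wrap (a : List Int) (hlen : a.length = 5002) (x d : Int)
    (h1 : -5002 ≤ x) (h2 : x ≤ 5001) :
    pyAddAt a x d = a.set ((x % 5002).toNat) (aget a ((x % 5002).toNat) + d) := by
  unfold pyAddAt
  rw [pyGet_wrap a hlen x h1 h2]
  simp only [PySem.List.pySetD, PySem.List.pySet?, hlen, pyIdx_wrap x h1 h2,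
    Option.map_some, Option.getD_some]

lemma length_pyAddAt (a : List Int) (i d : Int) : (pyAddAt a i d).length = a.length := by
  unfold pyAddAt
  cases PySem.List.pyGet? a i <;> simp [PySem.List.length_pySetD]

lemma aget_pyAddAt_wrap (a : List Int) (hlen : a.length = 5002) (x d : Int)
    (h1 : -5002 ≤ x) (h2 : x ≤ 5001) (j : Nat) :
    aget (pyAddAt a x d) j = aget a j + if (j : Int) = x % 5002 then d else 0 := by
  rw [pyAddAt_wrap a hlen x d h1 h2, aget_set]
  by_cases hc : (j : Int) = x % 5002
  · rw [if_pos ⟨by omega, by omega⟩, if_pos hc]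
    have : (x % 5002).toNat = j := by omega
    rw [this]
  · rw [if_neg (by intro h; exact hc (by omega)), if_neg hc]
    simp

lemma length_abody (a : List Int) (p : Int × Int) : (abody a p).length = a.length := by
  unfold abody
  split_ifs <;> rw [length_pyAddAt]

lemma aget_abody (a : List Int) (hlen : a.length = 5002) (p : Int × Int) (hp : evOK p)
    (j : Nat) : aget (abody a p) j = aget a j + evDelta p (j : Int) := by
  unfold abody evDelta
  by_cases hpar : PySem.Int.mod p.1 2 = 0
  · rw [if_pos hpar, if_pos hpar,
      aget_pyAddAt_wrap a hlen p.2 1 (hp.1 hpar).1 (hp.1 hpar).2]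
  · rw [if_neg hpar, if_neg hpar,
      aget_pyAddAt_wrap a hlen (p.2 + 1) (-1) (hp.2 hpar).1 (hp.2 hpar).2]

lemma length_foldl_abody (ps : List (Int × Int)) (a : List Int) :
    (ps.foldl abody a).length = a.length := by
  induction ps generalizing a with
  | nil => rfl
  | cons p ps ih => simp [List.foldl_cons, ih, length_abody]

lemma aget_foldl_abody (ps : List (Int × Int)) (a : List Int) (hlen : a.length = 5002)
    (hps : ∀ p ∈ ps, evOK p) (j : Nat) :
    aget (ps.foldl abody a) j = aget a j + (ps.map (fun p => evDelta p (j : Int))).sum := by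
  induction ps generalizing a with
  | nil => simp
  | cons p ps ih =>
      rw [List.foldl_cons, ih _ (by rw [length_abody]; exact hlen)
        (fun q hq => hps q (by simp [hq]))]
      rw [aget_abody a hlen p (hps p (by simp)) j]
      simp
      ring

lemma phase1A_eq (buses : List Int) :
    phase1A buses = (PySem.List.enumerate buses 0).foldl abody (List.replicate 5002 0) := by
  unfold phase1A abody
  rw [PySem.List.enumerate_eq_map_pyRange buses 0, List.foldl_map]

-- invariant of A's prefix-sum loop
lemma phase2_invariant (c1 : List Int) (hlen : c1.length = 5002) :
    ∀ n : Nat, n ≤ 5002 →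
      ((PySem.List.pyRange 1 (n : Int)).foldl
        (fun cnt i =>
          PySem.List.pySetD cnt i (PySem.List.pyGetD cnt (i - 1) 0 + PySem.List.pyGetD cnt i 0))
        c1).length = 5002 ∧
      ∀ j : Nat, j < 5002 →
        aget ((PySem.List.pyRange 1 (n : Int)).foldl
          (fun cnt i =>
            PySem.List.pySetD cnt i (PySem.List.pyGetD cnt (i - 1) 0 + PySem.List.pyGetD cnt i 0))
          c1) j = if j < n then pref c1 j else aget c1 j := by
  intro n
  induction n with
  | zero =>
      intro _
      rw [PySem.List.pyRange_one_eq_nil (by norm_num)]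
      simp [hlen]
  | succ n ih =>
      intro hn
      by_cases h0 : n = 0
      · subst h0
        rw [show ((0 + 1 : Nat) : Int) = 1 by norm_num, PySem.List.pyRange_one_eq_nil (by norm_num)]
        simp only [List.foldl_nil]
        refine ⟨hlen, ?_⟩
        intro j hj
        by_cases hj0 : j = 0
        · subst hj0
          rw [if_pos (by omega)]
          simp [pref]
        · rw [if_neg (by omega)]
      · have h1n : 1 ≤ n := by omega
        obtain ⟨F_len, F_get⟩ := ih (by omega)
        rw [show ((n + 1 : Nat) : Int) = (n : Int) + 1 by push_cast; ring,
            PySem.List.pyRange_one_succ_right (by exact_mod_cast h1n), List.foldl_append,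
            List.foldl_cons, List.foldl_nil]
        set F := (PySem.List.pyRange 1 (n : Int)).foldl
          (fun cnt i =>
            PySem.List.pySetD cnt i (PySem.List.pyGetD cnt (i - 1) 0 + PySem.List.pyGetD cnt i 0))
          c1 with hF
        have hv1 : PySem.List.pyGetD F ((n : Int) - 1) 0 = pref c1 (n - 1) := by
          rw [show ((n : Int) - 1) = ((n - 1 : Nat) : Int) by omega, PySem.List.pyGetD_natCast]
          have := F_get (n - 1) (by omega)
          rw [if_pos (by omega)] at this
          exact this
        have hv2 : PySem.List.pyGetD F (n : Int) 0 = aget c1 n := by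
          rw [PySem.List.pyGetD_natCast]
          have := F_get n (by omega)
          rw [if_neg (by omega)] at this
          exact this
        rw [hv1, hv2, PySem.List.pySetD_natCast]
        constructor
        · simp [F_len]
        · intro j hj
          rw [aget_set]
          by_cases hjn : j = n
          · subst hjn
            rw [if_pos ⟨rfl, by omega⟩, if_pos (by omega)]
            have : pref c1 j = pref c1 (j - 1) + aget c1 j := by
              unfold pref
              rw [show j - 1 + 1 = j by omega, Finset.sum_range_succ]
            omega
          · rw [if_neg (by intro h; exact hjn h.1), F_get j hj]
            by_cases hlt : j < n
            · rw [if_pos hlt, if_pos (by omega)]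
            · rw [if_neg hlt, if_neg (by omega)]

-- ---- B-side characterizations ----

-- a filterMap of in-range lookups over a range is a map
lemma filterMap_range_get (xs : List Int) (g : Nat → Nat) (n : Nat)
    (h : ∀ k, k < n → g k < xs.length) :
    List.filterMap (fun k => xs[g k]?) (List.range n)
      = (List.range n).map (fun k => xs.getD (g k) 0) := by
  induction n with
  | zero => simp
  | succ n ih =>
      rw [List.range_succ, List.filterMap_append, List.map_append,
        ih (fun k hk => h k (by omega))]
      have hn := h n (by omega)
      simp [List.getElem?_eq_getElem hn, List.getD_eq_getElem?_getD]

-- buses[::2] as an indexed map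
lemma slice_step2_even (xs : List Int) :
    (PySem.List.slice? xs none none 2).getD []
      = (List.range ((xs.length + 1) / 2)).map (fun k => xs.getD (2 * k) 0) := by
  rcases Nat.eq_zero_or_pos xs.length with h0 | hpos
  · rw [List.eq_nil_of_length_eq_zero h0]
    rfl
  · have hL : (0 : Int) < (xs.length : Int) := by exact_mod_cast hpos
    simp only [PySem.List.slice?, PySem.List.sliceIndices]
    norm_num
    rw [if_pos hpos]
    have hcnt : (((xs.length : Int) + 2 - 1) / 2).toNat = (xs.length + 1) / 2 := by omega
    have hix : ∀ k : Nat, ((2 * (k : Int))).toNat = 2 * k := by intro k; omega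
    simp only [hcnt, hix]
    rw [filterMap_range_get xs (fun k => 2 * k) _
      (fun k hk => by show 2 * k < xs.length; omega)]
    rfl

-- buses[1::2] as an indexed map
lemma slice_step2_odd (xs : List Int) :
    (PySem.List.slice? xs (some 1) none 2).getD []
      = (List.range (xs.length / 2)).map (fun k => xs.getD (2 * k + 1) 0) := by
  rcases Nat.lt_or_ge xs.length 2 with h2 | h2
  · interval_cases h : xs.length
    · rw [List.eq_nil_of_length_eq_zero h]
      rfl
    · obtain ⟨a, ha⟩ := List.length_eq_one_iff.mp h
      subst ha
      rfl
  · simp only [PySem.List.slice?, PySem.List.sliceIndices]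
    norm_num
    rw [show min (1 : Int) ((xs.length : Int)) = 1 from by omega]
    rw [if_pos (show 1 < xs.length by omega)]
    have hcnt : (((xs.length : Int) - 1 + 2 - 1) / 2).toNat = xs.length / 2 := by omega
    have hix : ∀ k : Nat, ((1 : Int) + 2 * (k : Int)).toNat = 2 * k + 1 := by intro k; omega
    simp only [hcnt, hix]
    rw [filterMap_range_get xs (fun k => 2 * k + 1) _
      (fun k hk => by show 2 * k + 1 < xs.length; omega)]
    rfl

-- diff[c::-1] is the reversed prefix up to c's table slot
lemma slice_back (xs : List Int) (hlen : xs.length = 5002) (c : Int)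
    (h1 : -5002 ≤ c) (h2 : c ≤ 5001) :
    (PySem.List.slice? xs (some c) none (-1)).getD []
      = (List.range ((c % 5002).toNat + 1)).map (fun k => xs.getD ((c % 5002).toNat - k) 0) := by
  have hstart : (if c < 0 then max (c + (xs.length : Int)) (-1)
      else min c ((xs.length : Int) - 1)) = ((c % 5002).toNat : Int) := by
    rw [hlen]
    split_ifs with hc <;> push_cast <;> omega
  simp only [PySem.List.slice?, PySem.List.sliceIndices]
  norm_num
  rw [hstart]
  rw [if_pos (show (-1 : Int) < ((c % 5002).toNat : Int) by omega)]
  rw [show ((((c % 5002).toNat : Int)) + 1).toNat = (c % 5002).toNat + 1 by omega]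
  have hix : ∀ k : Nat, k < (c % 5002).toNat + 1 →
      (((c % 5002).toNat : Int) + -(k : Int)).toNat = (c % 5002).toNat - k := by
    intro k hk; omega
  rw [List.filterMap_congr (fun k hk => by
    rw [hix k (by simpa using List.mem_range.mp hk)])]
  rw [filterMap_range_get xs (fun k => (c % 5002).toNat - k) _
    (fun k hk => by show (c % 5002).toNat - k < xs.length; omega)]
  rfl

-- the fold of "diff[f x] += w" over a list, pointwise
lemma aget_foldl_bump (l : List Int) (f : Int → Int) (w : Int) (a : List Int)
    (hlen : a.length = 5002) (hl : ∀ x ∈ l, -5002 ≤ f x ∧ f x ≤ 5001) (j : Nat) :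
    aget (l.foldl (fun d x => pyAddAt d (f x) w) a) j
      = aget a j + (l.map (fun x => if (j : Int) = f x % 5002 then w else 0)).sum := by
  induction l generalizing a with
  | nil => simp
  | cons x l ih =>
      rw [List.foldl_cons, ih _ (by rw [length_pyAddAt]; exact hlen)
        (fun y hy => hl y (by simp [hy]))]
      rw [aget_pyAddAt_wrap a hlen (f x) w (hl x (by simp)).1 (hl x (by simp)).2 j]
      simp
      ring

lemma length_foldl_bump (l : List Int) (f : Int → Int) (w : Int) (a : List Int) :
    (l.foldl (fun d x => pyAddAt d (f x) w) a).length = a.length := by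
  induction l generalizing a with
  | nil => rfl
  | cons x l ih => simp [List.foldl_cons, ih, length_pyAddAt]

-- parity split: the enumerate-sum of evDelta, for either parity of the start index
lemma enum_split (xs : List Int) (j : Int) : ∀ k : Int,
    ((PySem.List.enumerate xs k).map (fun p => evDelta p j)).sum
      = (if k % 2 = 0 then
          ((List.range ((xs.length + 1) / 2)).map
            (fun i => if j = xs.getD (2 * i) 0 % 5002 then (1 : Int) else 0)).sum
          + ((List.range (xs.length / 2)).map
            (fun i => if j = (xs.getD (2 * i + 1) 0 + 1) % 5002 then (-1 : Int) else 0)).sum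
        else
          ((List.range ((xs.length + 1) / 2)).map
            (fun i => if j = (xs.getD (2 * i) 0 + 1) % 5002 then (-1 : Int) else 0)).sum
          + ((List.range (xs.length / 2)).map
            (fun i => if j = xs.getD (2 * i + 1) 0 % 5002 then (1 : Int) else 0)).sum) := by
  induction xs with
  | nil =>
      intro k
      split_ifs <;> simp [PySem.List.enumerate]
  | cons a t ih =>
      intro k
      rw [PySem.List.enumerate_cons, List.map_cons, List.sum_cons, ih (k + 1)]
      have hshift1 : ∀ (f : Int → Int),
          ((List.range (((a :: t).length + 1) / 2)).map
            (fun i => f ((a :: t).getD (2 * i) 0))).sum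
          = f a + ((List.range (t.length / 2)).map (fun i => f (t.getD (2 * i + 1) 0))).sum := by
        intro f
        rw [show ((a :: t).length + 1) / 2 = t.length / 2 + 1 by simp [List.length_cons]; omega,
          List.range_succ_eq_map, List.map_cons, List.sum_cons, List.map_map]
        rw [show (a :: t).getD (2 * 0) 0 = a from rfl]
        congr 1
      have hshift2 : ∀ (f : Int → Int),
          ((List.range ((a :: t).length / 2)).map
            (fun i => f ((a :: t).getD (2 * i + 1) 0))).sum
          = ((List.range ((t.length + 1) / 2)).map (fun i => f (t.getD (2 * i) 0))).sum := by
        intro f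
        rw [show (a :: t).length / 2 = (t.length + 1) / 2 by simp [List.length_cons]]
        refine congrArg List.sum (List.map_congr_left ?_)
        intro i _
        rw [List.getD_cons_succ]
      by_cases hk : k % 2 = 0
      · rw [if_pos hk, if_neg (by omega : ¬ (k + 1) % 2 = 0)]
        rw [hshift1 (fun x => if j = x % 5002 then (1 : Int) else 0),
          hshift2 (fun x => if j = (x + 1) % 5002 then (-1 : Int) else 0)]
        have : evDelta (k, a) j = if j = a % 5002 then (1 : Int) else 0 := by
          unfold evDelta
          rw [if_pos (by rw [modtwo]; exact hk)]
        rw [this]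
        ring
      · rw [if_neg hk, if_pos (by omega : (k + 1) % 2 = 0)]
        rw [hshift1 (fun x => if j = (x + 1) % 5002 then (-1 : Int) else 0),
          hshift2 (fun x => if j = x % 5002 then (1 : Int) else 0)]
        have : evDelta (k, a) j = if j = (a + 1) % 5002 then (-1 : Int) else 0 := by
          unfold evDelta
          rw [if_neg (by rw [modtwo]; exact hk)]
        rw [this]
        ring

-- parity split at start index 0
lemma enumerate_parity_split (xs : List Int) (j : Int) :
    ((PySem.List.enumerate xs 0).map (fun p => evDelta p j)).sum
      = ((List.range ((xs.length + 1) / 2)).map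
          (fun k => if j = xs.getD (2 * k) 0 % 5002 then (1 : Int) else 0)).sum
        + ((List.range (xs.length / 2)).map
          (fun k => if j = (xs.getD (2 * k + 1) 0 + 1) % 5002 then (-1 : Int) else 0)).sum := by
  have := enum_split xs j 0
  rwa [if_pos (by norm_num)] at this

-- sum of a List.range map as a Finset sum
lemma sum_map_range (n : Nat) (f : Nat → Int) :
    ((List.range n).map f).sum = ∑ k ∈ Finset.range n, f k := by
  induction n with
  | zero => simp
  | succ n ih =>
      rw [List.range_succ, Finset.sum_range_succ, List.map_append, List.sum_append, ih]
      simp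

-- the heart: A's table lookup equals B's per-query delta sum, for an in-range city
lemma table_eq_sum (buses : List Int)
    (hbus : ∀ k < buses.length,
      (k % 2 = 0 → -5002 ≤ buses.getD k 0 ∧ buses.getD k 0 ≤ 5001) ∧
      (k % 2 = 1 → -5003 ≤ buses.getD k 0 ∧ buses.getD k 0 ≤ 5000))
    (diff2 : List Int)
    (hdiff : diff2 = ((PySem.List.slice? buses (some 1) none 2).getD []).foldl
        (fun d e => pyAddAt d (e + 1) (-1))
        (((PySem.List.slice? buses none none 2).getD []).foldl (fun d s => pyAddAt d s 1)
          (List.replicate 5002 0)))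
    (c : Int) (hc1 : -5002 ≤ c) (hc2 : c ≤ 5001) :
    PySem.List.pyGetD (phase2A (phase1A buses)) c 0
      = ((PySem.List.slice? diff2 (some c) none (-1)).getD []).sum := by
  subst hdiff
  -- A side: the table entry is the enumerate-sum of deltas
  have hev : ∀ p ∈ PySem.List.enumerate buses 0, evOK p := by
    intro p hp
    rw [PySem.List.mem_enumerate_iff] at hp
    obtain ⟨k, hk, rfl⟩ := hp
    have hb := hbus k hk
    have hgd : buses.getD k 0 = buses[k] := List.getD_eq_getElem buses 0 hk
    rw [hgd] at hb
    constructor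
    · intro hpar
      rw [modtwo] at hpar
      exact hb.1 (by omega)
    · intro hpar
      rw [modtwo] at hpar
      have := hb.2 (by omega)
      omega
  have h1 := phase1A_eq buses
  have hlen1 : (phase1A buses).length = 5002 := by
    rw [h1, length_foldl_abody, List.length_replicate]
  have hrep : ∀ j : Nat, aget (List.replicate 5002 (0 : Int)) j = 0 := by
    intro j
    by_cases hj : j < 5002
    · exact List.getD_replicate 0 hj
    · exact List.getD_eq_default _ _ (by rw [List.length_replicate]; omega)
  have hget1 : ∀ j : Nat, aget (phase1A buses) j
      = ((PySem.List.enumerate buses 0).map (fun p => evDelta p (j : Int))).sum := by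
    intro j
    rw [h1, aget_foldl_abody _ _ (by rw [List.length_replicate]) hev j, hrep, zero_add]
  obtain ⟨m, hm, hcm⟩ : ∃ m : Nat, m < 5002 ∧ c % 5002 = (m : Int) :=
    ⟨(c % 5002).toNat, by omega, by omega⟩
  have hA : PySem.List.pyGetD (phase2A (phase1A buses)) c 0 = pref (phase1A buses) m := by
    unfold phase2A
    rw [show PySem.List.len (phase1A buses) = ((5002 : Nat) : Int) by
          simp [PySem.List.len_eq, hlen1]]
    obtain ⟨F_len, hF⟩ := phase2_invariant (phase1A buses) hlen1 5002 (le_refl _)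
    rw [pyGetD_wrap _ F_len c hc1 hc2, hcm]
    have := hF m hm
    rw [if_pos hm] at this
    rw [show ((m : Int)).toNat = m by omega, this]
  -- B side: the two strided folds, pointwise
  simp only [slice_step2_even, slice_step2_odd]
  set E := (List.range ((buses.length + 1) / 2)).map (fun k => buses.getD (2 * k) 0) with hE
  set O := (List.range (buses.length / 2)).map (fun k => buses.getD (2 * k + 1) 0) with hO
  set d1 := E.foldl (fun d s => pyAddAt d s 1) (List.replicate 5002 0) with hd1
  set d2 := O.foldl (fun d e => pyAddAt d (e + 1) (-1)) d1 with hd2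
  have hEmem : ∀ x ∈ E, -5002 ≤ x ∧ x ≤ 5001 := by
    intro x hx
    rw [hE] at hx
    obtain ⟨k, hk, rfl⟩ := List.mem_map.mp hx
    have hk' := List.mem_range.mp hk
    exact (hbus (2 * k) (by omega)).1 (by omega)
  have hOmem : ∀ x ∈ O, -5002 ≤ x + 1 ∧ x + 1 ≤ 5001 := by
    intro x hx
    rw [hO] at hx
    obtain ⟨k, hk, rfl⟩ := List.mem_map.mp hx
    have hk' := List.mem_range.mp hk
    have := (hbus (2 * k + 1) (by omega)).2 (by omega)
    omega
  have hlen_d1 : d1.length = 5002 := by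
    have h := length_foldl_bump E (fun x => x) 1 (List.replicate 5002 0)
    rw [List.length_replicate] at h
    exact h
  have hlen_d2 : d2.length = 5002 := by
    have h := length_foldl_bump O (fun x => x + 1) (-1) d1
    rw [hlen_d1] at h
    exact h
  have hget_d1 : ∀ j : Nat, aget d1 j
      = (E.map (fun x => if (j : Int) = x % 5002 then (1 : Int) else 0)).sum := by
    intro j
    have h := aget_foldl_bump E (fun x => x) 1 (List.replicate 5002 0)
      (by rw [List.length_replicate]) hEmem j
    rw [hrep j, zero_add] at h
    exact h
  have hget_d2 : ∀ j : Nat, aget d2 j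
      = (E.map (fun x => if (j : Int) = x % 5002 then (1 : Int) else 0)).sum
        + (O.map (fun x => if (j : Int) = (x + 1) % 5002 then (-1 : Int) else 0)).sum := by
    intro j
    have h := aget_foldl_bump O (fun x => x + 1) (-1) d1 hlen_d1 hOmem j
    rw [hget_d1 j] at h
    exact h
  -- pointwise equality of the two tables
  have htab : ∀ j : Nat, aget (phase1A buses) j = aget d2 j := by
    intro j
    rw [hget1 j, enumerate_parity_split buses (j : Int), hget_d2 j, hE, hO]
    simp only [List.map_map, Function.comp_def]
  -- B's per-query sum is the prefix sum of its table
  have hB : ((PySem.List.slice? d2 (some c) none (-1)).getD []).sum = pref d2 m := by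
    rw [slice_back d2 hlen_d2 c hc1 hc2,
      show (c % 5002).toNat = m from by omega, sum_map_range]
    calc (∑ k ∈ Finset.range (m + 1), d2.getD (m - k) 0)
        = ∑ k ∈ Finset.range (m + 1), aget d2 (m + 1 - 1 - k) :=
          Finset.sum_congr rfl (fun k _ => by rw [show m + 1 - 1 - k = m - k from by omega]; rfl)
      _ = ∑ t ∈ Finset.range (m + 1), aget d2 t := Finset.sum_range_reflect _ _
      _ = pref d2 m := rfl
  rw [hA, hB]
  unfold pref
  exact Finset.sum_congr rfl (fun t _ => htab t)

-- ===== VERDICT (by name: the statement is the Claim_ definition above) =====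
set_option maxRecDepth 8000 in
theorem solution_spec : Claim_equal_solution := by
  intro N buses P cities _ hpre
  obtain ⟨hbus, hc⟩ := hpre
  unfold Spec_solution solution solution_alt
  simp only [List.map_map]
  refine congrArg (PySem.Str.join " ") ?_
  apply List.map_congr_left
  intro c hcmem
  have hcr := hc c hcmem
  simp only [Function.comp_apply]
  rw [table_eq_sum buses hbus _ rfl c hcr.1 hcr.2]
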